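-- pv_equiv track=rewrite | github.com/coyo-hm/Algorithm_Study | BAEKJOON/17144/01_251119.py | circulate
-- ===== SOURCE A (Python) =====
-- def circulate(air_r, graph, R, C):
--     prev_u, curr_u = 0, 0
--     prev_d, curr_d = 0, 0
--     for c in range(1, C):
--         curr_u = graph[air_r][c]
--         graph[air_r][c] = prev_u
--         prev_u = curr_u
--         curr_d = graph[air_r + 1][c]
--         graph[air_r + 1][c] = prev_d
--         prev_d = curr_d
--
--     for r in range(air_r - 1, -1, -1):
--         curr_u = graph[r][C - 1]
--         graph[r][C - 1] = prev_u
--         prev_u = curr_u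
--
--     for r in range(air_r + 2, R):
--         curr_d = graph[r][C - 1]
--         graph[r][C - 1] = prev_d
--         prev_d = curr_d
--
--     for c in range(C - 2, -1, -1):
--         curr_u = graph[0][c]
--         graph[0][c] = prev_u
--         prev_u = curr_u
--         curr_d = graph[R - 1][c]
--         graph[R - 1][c] = prev_d
--         prev_d = curr_d
--
--     for r in range(1, air_r):
--         curr_u = graph[r][0]
--         graph[r][0] = prev_u
--         prev_u = curr_u
--
--     for r in range(R - 2, air_r + 1, -1):
--         curr_d = graph[r][0]
--         graph[r][0] = prev_d
--         prev_d = curr_d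
--
--     return graph
-- ===== SOURCE B (Python) =====
-- def circulate(air_r, graph, R, C):
--     up = ([(air_r, c) for c in range(1, C)]
--           + [(r, C - 1) for r in range(air_r - 1, -1, -1)]
--           + [(0, c) for c in range(C - 2, -1, -1)]
--           + [(r, 0) for r in range(1, air_r)])
--     down = ([(air_r + 1, c) for c in range(1, C)]
--             + [(r, C - 1) for r in range(air_r + 2, R)]
--             + [(R - 1, c) for c in range(C - 2, -1, -1)]
--             + [(r, 0) for r in range(R - 2, air_r + 1, -1)])
--     # gather: the new value of every ring cell, read from the untouched grid
--     new = {}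
--     for cells in (up, down):
--         if cells:
--             new[cells[0]] = 0
--         for src, dst in zip(cells, cells[1:]):
--             new[dst] = graph[src[0]][src[1]]
--     # scatter: apply all updates
--     for (r, c), v in new.items():
--         graph[r][c] = v
--     return graph
-- ===== Notes on version B (the rewrite author's own statement) =====
-- stated objective: alternative
-- what changed: Replaces A's in-place carry-shift over six interleaved loops by a gather-then-scatter scheme: B first builds a dict mapping every ring cell to its new value (its predecessor's value read from the untouched grid, 0 at the purifier outlet) and only then writes all updates. …
-- outside the precondition, e.g. on circulate(3, [[1], [2], [3], [4]], 4, 1): A returns [[2], [1], [3], [4]], B returns [[2], [1], [2], [4]]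
import Mathlib
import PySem

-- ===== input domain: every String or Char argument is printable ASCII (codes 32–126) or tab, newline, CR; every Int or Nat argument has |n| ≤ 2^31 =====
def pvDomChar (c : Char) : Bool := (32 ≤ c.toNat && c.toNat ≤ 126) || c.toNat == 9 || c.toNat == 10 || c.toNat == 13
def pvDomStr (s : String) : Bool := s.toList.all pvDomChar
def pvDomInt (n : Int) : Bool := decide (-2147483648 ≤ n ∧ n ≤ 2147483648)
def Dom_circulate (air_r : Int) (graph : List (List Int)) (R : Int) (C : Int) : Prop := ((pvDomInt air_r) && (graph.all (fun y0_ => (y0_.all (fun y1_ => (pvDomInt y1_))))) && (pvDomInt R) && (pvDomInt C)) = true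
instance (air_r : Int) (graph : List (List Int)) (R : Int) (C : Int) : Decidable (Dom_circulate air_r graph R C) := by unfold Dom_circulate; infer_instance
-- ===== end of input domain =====

-- B replaces A's six interleaved in-place carry-shift loops by gather-then-scatter: it first
-- records every ring cell's new value in a dict read from the untouched grid, then applies all
-- writes (alternative decomposition, same cost).
-- Both Pythons mutate `graph` in place; the equivalence proved here is about the returned value.


-- ===== PORT A =====
-- graph[r][c] (valid indices only under Pre_, hence the total pyGetD/pySetD forms)
def gC (g : List (List Int)) (r c : Int) : Int :=
  PySem.List.pyGetD (PySem.List.pyGetD g r []) c 0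

-- graph[r][c] = v
def sC (g : List (List Int)) (r c : Int) (v : Int) : List (List Int) :=
  PySem.List.pySetD g r (PySem.List.pySetD (PySem.List.pyGetD g r []) c v)

def circulate (air_r : Int) (graph : List (List Int)) (R : Int) (C : Int) : List (List Int) :=
  -- for c in range(1, C): two carried swaps (rows air_r and air_r+1)
  let st1 := (PySem.List.pyRange 1 C 1).foldl
    (fun (st : List (List Int) × Int × Int) c =>
      let cu := gC st.1 air_r c
      let g1 := sC st.1 air_r c st.2.1
      let cd := gC g1 (air_r + 1) c
      let g2 := sC g1 (air_r + 1) c st.2.2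
      (g2, cu, cd)) (graph, 0, 0)
  -- for r in range(air_r-1, -1, -1)
  let st2 := (PySem.List.pyRange (air_r - 1) (-1) (-1)).foldl
    (fun (st : List (List Int) × Int) r =>
      (sC st.1 r (C - 1) st.2, gC st.1 r (C - 1))) (st1.1, st1.2.1)
  -- for r in range(air_r+2, R)
  let st3 := (PySem.List.pyRange (air_r + 2) R 1).foldl
    (fun (st : List (List Int) × Int) r =>
      (sC st.1 r (C - 1) st.2, gC st.1 r (C - 1))) (st2.1, st1.2.2)
  -- for c in range(C-2, -1, -1): two carried swaps (rows 0 and R-1)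
  let st4 := (PySem.List.pyRange (C - 2) (-1) (-1)).foldl
    (fun (st : List (List Int) × Int × Int) c =>
      let cu := gC st.1 0 c
      let g1 := sC st.1 0 c st.2.1
      let cd := gC g1 (R - 1) c
      let g2 := sC g1 (R - 1) c st.2.2
      (g2, cu, cd)) (st3.1, st2.2, st3.2)
  -- for r in range(1, air_r)
  let st5 := (PySem.List.pyRange 1 air_r 1).foldl
    (fun (st : List (List Int) × Int) r =>
      (sC st.1 r 0 st.2, gC st.1 r 0)) (st4.1, st4.2.1)
  -- for r in range(R-2, air_r+1, -1)
  let st6 := (PySem.List.pyRange (R - 2) (air_r + 1) (-1)).foldl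
    (fun (st : List (List Int) × Int) r =>
      (sC st.1 r 0 st.2, gC st.1 r 0)) (st5.1, st4.2.2)
  st6.1

-- ===== PORT B =====
def upPath (air_r : Int) (_R : Int) (C : Int) : List (Int × Int) :=
  (PySem.List.pyRange 1 C 1).map (fun c => (air_r, c))
  ++ (PySem.List.pyRange (air_r - 1) (-1) (-1)).map (fun r => (r, C - 1))
  ++ (PySem.List.pyRange (C - 2) (-1) (-1)).map (fun c => ((0 : Int), c))
  ++ (PySem.List.pyRange 1 air_r 1).map (fun r => (r, (0 : Int)))

def downPath (air_r : Int) (R : Int) (C : Int) : List (Int × Int) :=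
  (PySem.List.pyRange 1 C 1).map (fun c => (air_r + 1, c))
  ++ (PySem.List.pyRange (air_r + 2) R 1).map (fun r => (r, C - 1))
  ++ (PySem.List.pyRange (C - 2) (-1) (-1)).map (fun c => (R - 1, c))
  ++ (PySem.List.pyRange (R - 2) (air_r + 1) (-1)).map (fun r => (r, (0 : Int)))

-- gather phase for one ring: 'if cells: new[cells[0]] = 0' then
-- 'for src, dst in zip(cells, cells[1:]): new[dst] = graph[src[0]][src[1]]'
def ringPairs (g : List (List Int)) (d : PySem.Dict (Int × Int) Int)
    (cells : List (Int × Int)) : PySem.Dict (Int × Int) Int :=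
  let d1 := match cells with | [] => d | h :: _ => d.insert h 0
  (cells.zip cells.tail).foldl (fun d sd => d.insert sd.2 (gC g sd.1.1 sd.1.2)) d1

def circulate_alt (air_r : Int) (graph : List (List Int)) (R : Int) (C : Int) : List (List Int) :=
  let up := upPath air_r R C
  let down := downPath air_r R C
  let d := ringPairs graph (ringPairs graph PySem.Dict.empty up) down
  -- scatter phase: 'for (r, c), v in new.items(): graph[r][c] = v'
  d.items.foldl (fun g pv => sC g pv.1.1 pv.1.2 pv.2) graph

-- ===== PRECONDITION & SPEC =====
-- Pre_ excludes inputs where A raises (an index out of range), the degenerate shapes where a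
-- ring path revisits a cell (purifier row at the border with C ≥ 3, or a C = 1 chain that folds
-- back), on which A's sequential double shift of the same cells is an implementation artefact,
-- and shapes whose accesses only succeed through Python negative-index wraparound.
def Pre_circulate (air_r : Int) (graph : List (List Int)) (R : Int) (C : Int) : Prop :=
  (2 ≤ C ∧ 0 ≤ air_r ∧ air_r + 2 ≤ R ∧ R ≤ (graph.length : Int) ∧
     (∀ row ∈ graph.take R.toNat, C ≤ (row.length : Int)) ∧
     (1 ≤ air_r ∨ C = 2) ∧ (air_r + 3 ≤ R ∨ C = 2)) ∨
  (C = 1 ∧ 0 ≤ air_r ∧ air_r ≤ 1 ∧ R ≤ air_r + 3 ∧ air_r ≤ (graph.length : Int) ∧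
     (∀ row ∈ graph.take air_r.toNat, 1 ≤ (row.length : Int)) ∧
     (R ≤ air_r + 2 ∨ (R ≤ (graph.length : Int) ∧
        ∀ row ∈ (graph.take R.toNat).drop (air_r + 2).toNat, 1 ≤ (row.length : Int)))) ∨
  (C ≤ 1 ∧ air_r ≤ 0 ∧ R ≤ air_r + 2)

instance (air_r : Int) (graph : List (List Int)) (R : Int) (C : Int) : Decidable (Pre_circulate air_r graph R C) := by unfold Pre_circulate; infer_instance

def pvWitness_circulate : Int × List (List Int) × Int × Int :=
  (1, [[1, 2], [3, 4], [5, 6], [7, 8]], 4, 2)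

def Spec_circulate (air_r : Int) (graph : List (List Int)) (R : Int) (C : Int) (out : List (List Int)) : Prop := out = circulate_alt air_r graph R C
instance (air_r : Int) (graph : List (List Int)) (R : Int) (C : Int) (out : List (List Int)) : Decidable (Spec_circulate air_r graph R C out) := by unfold Spec_circulate; infer_instance

-- ===== CLAIM (what is proved, stated in full; the proofs are below) =====
def Claim_equal_circulate : Prop := ∀ (air_r : Int) (graph : List (List Int)) (R : Int) (C : Int), Dom_circulate air_r graph R C → Pre_circulate air_r graph R C → Spec_circulate air_r graph R C (circulate air_r graph R C)

-- ===== LEMMAS AND PROOFS =====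

-- Nat-indexed cell operations (what gC/sC compute on nonnegative indices)
def gN (g : List (List Int)) (p : Nat × Nat) : Int := (g.getD p.1 []).getD p.2 0

def sN (g : List (List Int)) (p : Nat × Nat) (v : Int) : List (List Int) :=
  g.set p.1 ((g.getD p.1 []).set p.2 v)

def cstepN (st : List (List Int) × Int) (p : Nat × Nat) : List (List Int) × Int :=
  (sN st.1 p st.2, gN st.1 p)

def cfoldN (st : List (List Int) × Int) (path : List (Nat × Nat)) : List (List Int) × Int :=
  path.foldl cstepN st

theorem getD_set_ne {α : Type} (l : List α) (i j : Nat) (a d : α) (h : i ≠ j) :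
    (l.set i a).getD j d = l.getD j d := by
  simp [List.getD_eq_getElem?_getD, List.getElem?_set_ne h]

theorem getD_set_self {α : Type} (l : List α) (i : Nat) (a d : α) (h : i < l.length) :
    (l.set i a).getD i d = a := by
  simp [List.getD_eq_getElem?_getD, h]

theorem gN_sN_ne (g : List (List Int)) (v : Int) {p q : Nat × Nat} (h : p ≠ q) :
    gN (sN g p v) q = gN g q := by
  rcases p with ⟨pr, pc⟩; rcases q with ⟨qr, qc⟩
  simp only [gN, sN]
  by_cases hr : pr = qr
  · subst hr
    have hc : pc ≠ qc := by simpa using h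
    by_cases hl : pr < g.length
    · rw [getD_set_self _ _ _ _ hl, getD_set_ne _ _ _ _ _ hc]
    · rw [List.set_eq_of_length_le (not_lt.1 hl)]
  · rw [getD_set_ne _ _ _ _ _ hr]

theorem sN_sN_comm (g : List (List Int)) (v w : Int) {p q : Nat × Nat} (h : p ≠ q) :
    sN (sN g p v) q w = sN (sN g q w) p v := by
  rcases p with ⟨pr, pc⟩; rcases q with ⟨qr, qc⟩
  simp only [sN]
  by_cases hr : pr = qr
  · subst hr
    have hc : pc ≠ qc := by simpa using h
    by_cases hl : pr < g.length
    · rw [getD_set_self _ _ _ _ hl, getD_set_self _ _ _ _ hl, List.set_set, List.set_set,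
        List.set_comm _ _ hc.symm]
    · have h1 : g.set pr ((g.getD pr []).set pc v) = g := List.set_eq_of_length_le (not_lt.1 hl)
      have h2 : g.set pr ((g.getD pr []).set qc w) = g := List.set_eq_of_length_le (not_lt.1 hl)
      rw [h1, h2, h1]
  · rw [getD_set_ne _ _ _ _ _ hr, getD_set_ne _ _ _ _ _ (Ne.symm hr),
      List.set_comm _ _ hr]

theorem gN_cfold (q : Nat × Nat) (path : List (Nat × Nat)) (h : ∀ p ∈ path, p ≠ q) :
    ∀ st : List (List Int) × Int, gN (cfoldN st path).1 q = gN st.1 q := by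
  induction path with
  | nil => intro st; rfl
  | cons p ps ih =>
    intro st
    have := ih (fun r hr => h r (List.mem_cons_of_mem _ hr)) (cstepN st p)
    simpa [cfoldN, cstepN, gN_sN_ne _ _ (h p (List.mem_cons_self ..))] using this

theorem sN_cfold_comm (q : Nat × Nat) (w : Int) (path : List (Nat × Nat))
    (h : ∀ p ∈ path, p ≠ q) :
    ∀ st : List (List Int) × Int,
      cfoldN (sN st.1 q w, st.2) path = (sN (cfoldN st path).1 q w, (cfoldN st path).2) := by
  induction path with
  | nil => intro st; rfl
  | cons p ps ih =>
    intro st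
    have hpq : p ≠ q := h p (List.mem_cons_self ..)
    have step : cfoldN (sN st.1 q w, st.2) (p :: ps)
        = cfoldN (sN (cstepN st p).1 q w, (cstepN st p).2) ps := by
      simp only [cfoldN, List.foldl_cons, cstepN]
      rw [gN_sN_ne _ _ (Ne.symm hpq), sN_sN_comm _ _ _ (Ne.symm hpq)]
    rw [step, ih (fun r hr => h r (List.mem_cons_of_mem _ hr)) (cstepN st p)]
    rfl

theorem cfold_swap (P Q : List (Nat × Nat)) (h : ∀ p ∈ P, ∀ q ∈ Q, p ≠ q) :
    ∀ (g : List (List Int)) (x y : Int),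
      cfoldN ((cfoldN (g, y) Q).1, x) P
        = ((cfoldN ((cfoldN (g, x) P).1, y) Q).1, (cfoldN (g, x) P).2) := by
  induction Q with
  | nil => intro g x y; simp [cfoldN]
  | cons q Q' ih =>
    intro g x y
    have hPq : ∀ p ∈ P, p ≠ q := fun p hp => h p hp q (List.mem_cons_self ..)
    have ih' := ih (fun p hp r hr => h p hp r (List.mem_cons_of_mem _ hr))
      (sN g q y) x (gN g q)
    have e1 : cfoldN ((g, y) : List (List Int) × Int) (q :: Q') = cfoldN (sN g q y, gN g q) Q' := rfl
    have e2 : cfoldN ((sN g q y, x) : List (List Int) × Int) P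
        = (sN (cfoldN (g, x) P).1 q y, (cfoldN (g, x) P).2) := by
      have := sN_cfold_comm q y P hPq (g, x)
      simpa using this
    have e3 : gN g q = gN (cfoldN ((g, x) : List (List Int) × Int) P).1 q :=
      (gN_cfold q P hPq (g, x)).symm
    rw [e1, ih', e2, e3]
    rfl

-- the interleaved two-carry loop body of A's first and fourth loops, Nat level
def istep (u d : Int → Nat × Nat) (st : List (List Int) × Int × Int) (c : Int) :
    List (List Int) × Int × Int :=
  let s1 := cstepN (st.1, st.2.1) (u c)
  let s2 := cstepN (s1.1, st.2.2) (d c)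
  (s2.1, s1.2, s2.2)

theorem interleave_split (u d : Int → Nat × Nat) (l : List Int)
    (h : ∀ a ∈ l, ∀ b ∈ l, u a ≠ d b) :
    ∀ (g : List (List Int)) (x y : Int),
      l.foldl (istep u d) (g, x, y)
        = ((cfoldN ((cfoldN (g, x) (l.map u)).1, y) (l.map d)).1,
           (cfoldN (g, x) (l.map u)).2,
           (cfoldN ((cfoldN (g, x) (l.map u)).1, y) (l.map d)).2) := by
  induction l with
  | nil => intro g x y; simp [cfoldN]
  | cons c l ih =>
    intro g x y
    have hcc : u c ≠ d c := h c (List.mem_cons_self ..) c (List.mem_cons_self ..)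
    have hul : ∀ p ∈ l.map u, p ≠ d c := by
      intro p hp
      rcases List.mem_map.1 hp with ⟨a, ha, rfl⟩
      exact h a (List.mem_cons_of_mem _ ha) c (List.mem_cons_self ..)
    have ih' := ih (fun a ha b hb => h a (List.mem_cons_of_mem _ ha) b (List.mem_cons_of_mem _ hb))
      (sN (sN g (u c) x) (d c) y) (gN g (u c)) (gN g (d c))
    have estep : (c :: l).foldl (istep u d) (g, x, y)
        = l.foldl (istep u d) (sN (sN g (u c) x) (d c) y, gN g (u c), gN g (d c)) := by
      simp only [List.foldl_cons, istep, cstepN]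
      rw [gN_sN_ne _ _ hcc]
    rw [estep, ih']
    have e2 : cfoldN ((sN (sN g (u c) x) (d c) y, gN g (u c)) : List (List Int) × Int) (l.map u)
        = (sN (cfoldN (sN g (u c) x, gN g (u c)) (l.map u)).1 (d c) y,
           (cfoldN (sN g (u c) x, gN g (u c)) (l.map u)).2) := by
      have := sN_cfold_comm (d c) y (l.map u) hul (sN g (u c) x, gN g (u c))
      simpa using this
    have e3 : gN g (d c) = gN (cfoldN ((sN g (u c) x, gN g (u c)) : List (List Int) × Int) (l.map u)).1 (d c) := by
      rw [gN_cfold (d c) (l.map u) hul, gN_sN_ne _ _ hcc]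
    have e4 : cfoldN ((g, x) : List (List Int) × Int) ((c :: l).map u)
        = cfoldN (sN g (u c) x, gN g (u c)) (l.map u) := rfl
    rw [e2, e3, e4]
    rfl

def toNatP (p : Int × Int) : Nat × Nat := (p.1.toNat, p.2.toNat)

theorem cfoldN_append (st : List (List Int) × Int) (P Q : List (Nat × Nat)) :
    cfoldN st (P ++ Q) = cfoldN (cfoldN st P) Q :=
  List.foldl_append

theorem gC_toNat (g : List (List Int)) {r c : Int} (hr : 0 ≤ r) (hc : 0 ≤ c) :
    gC g r c = gN g (r.toNat, c.toNat) := by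
  simp [gC, gN, PySem.List.pyGetD_of_nonneg _ _ hr, PySem.List.pyGetD_of_nonneg _ _ hc]

theorem sC_toNat (g : List (List Int)) {r c : Int} (v : Int) (hr : 0 ≤ r) (hc : 0 ≤ c) :
    sC g r c v = sN g (r.toNat, c.toNat) v := by
  simp [sC, sN, PySem.List.pyGetD_of_nonneg _ _ hr, PySem.List.pySetD_of_nonneg _ _ hr,
    PySem.List.pySetD_of_nonneg _ _ hc]

-- A's single-carry loops, Int level → cfoldN
theorem cfoldC_toNat (l : List Int) (fr fc : Int → Int)
    (h : ∀ a ∈ l, 0 ≤ fr a ∧ 0 ≤ fc a) :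
    ∀ st : List (List Int) × Int,
      l.foldl (fun st a => (sC st.1 (fr a) (fc a) st.2, gC st.1 (fr a) (fc a))) st
        = cfoldN st (l.map (fun a => ((fr a).toNat, (fc a).toNat))) := by
  induction l with
  | nil => intro st; rfl
  | cons a l ih =>
    intro st
    have ha := h a (List.mem_cons_self ..)
    simp only [List.foldl_cons, List.map_cons, cfoldN, cstepN,
      gC_toNat _ ha.1 ha.2, sC_toNat _ _ ha.1 ha.2]
    exact ih (fun b hb => h b (List.mem_cons_of_mem _ hb)) _

-- A's two-carry interleaved loops, Int level → istep
theorem ifoldC_toNat (l : List Int) (ur uc dr dc : Int → Int)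
    (hu : ∀ a ∈ l, 0 ≤ ur a ∧ 0 ≤ uc a)
    (hd : ∀ a ∈ l, 0 ≤ dr a ∧ 0 ≤ dc a) :
    ∀ st : List (List Int) × Int × Int,
      l.foldl (fun st a =>
          (sC (sC st.1 (ur a) (uc a) st.2.1) (dr a) (dc a) st.2.2,
           gC st.1 (ur a) (uc a),
           gC (sC st.1 (ur a) (uc a) st.2.1) (dr a) (dc a))) st
        = l.foldl (istep (fun a => ((ur a).toNat, (uc a).toNat))
            (fun a => ((dr a).toNat, (dc a).toNat))) st := by
  induction l with
  | nil => intro st; rfl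
  | cons a l ih =>
    intro st
    have hua := hu a (List.mem_cons_self ..)
    have hda := hd a (List.mem_cons_self ..)
    simp only [List.foldl_cons, istep, cstepN,
      gC_toNat _ hua.1 hua.2, sC_toNat _ _ hua.1 hua.2,
      gC_toNat _ hda.1 hda.2, sC_toNat _ _ hda.1 hda.2]
    exact ih (fun b hb => hu b (List.mem_cons_of_mem _ hb))
      (fun b hb => hd b (List.mem_cons_of_mem _ hb)) _

-- reordering A's u/d fold sequence into "all u, then all d"
theorem assemble (U1 U2 U3 U4 D1 D2 D3 D4 : List (Nat × Nat)) (g : List (List Int))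
    (h : ∀ p ∈ ((U1 ++ U2) ++ U3) ++ U4, ∀ q ∈ ((D1 ++ D2) ++ D3) ++ D4, p ≠ q) :
    (let s1 := cfoldN (g, 0) U1
     let d1 := cfoldN (s1.1, 0) D1
     let s2 := cfoldN (d1.1, s1.2) U2
     let s3 := cfoldN (s2.1, d1.2) D2
     let s4 := cfoldN (s3.1, s2.2) U3
     let d3 := cfoldN (s4.1, s3.2) D3
     let s5 := cfoldN (d3.1, s4.2) U4
     let s6 := cfoldN (s5.1, d3.2) D4
     s6.1)
    = (cfoldN ((cfoldN (g, 0) (((U1 ++ U2) ++ U3) ++ U4)).1, 0) (((D1 ++ D2) ++ D3) ++ D4)).1 := by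
  have hm : ∀ {P Q : List (Nat × Nat)},
      (∀ p ∈ P, p ∈ ((U1 ++ U2) ++ U3) ++ U4) → (∀ q ∈ Q, q ∈ ((D1 ++ D2) ++ D3) ++ D4) →
      ∀ p ∈ P, ∀ q ∈ Q, p ≠ q :=
    fun hP hQ p hp q hq => h p (hP p hp) q (hQ q hq)
  have hU2 : ∀ p ∈ U2, p ∈ ((U1 ++ U2) ++ U3) ++ U4 := fun p hp => by simp [hp]
  have hU3 : ∀ p ∈ U3, p ∈ ((U1 ++ U2) ++ U3) ++ U4 := fun p hp => by simp [hp]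
  have hU4 : ∀ p ∈ U4, p ∈ ((U1 ++ U2) ++ U3) ++ U4 := fun p hp => by simp [hp]
  have hD1 : ∀ q ∈ D1, q ∈ ((D1 ++ D2) ++ D3) ++ D4 := fun q hq => by simp [hq]
  have hD12 : ∀ q ∈ D1 ++ D2, q ∈ ((D1 ++ D2) ++ D3) ++ D4 := fun q hq => by
    simp at hq ⊢; tauto
  have hD123 : ∀ q ∈ (D1 ++ D2) ++ D3, q ∈ ((D1 ++ D2) ++ D3) ++ D4 := fun q hq => by
    simp at hq ⊢; tauto
  have h1 := hm hU2 hD1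
  have h1' : ∀ p ∈ D1, ∀ q ∈ U2, p ≠ q := fun p hp q hq => (h1 q hq p hp).symm
  have h2 := hm hU3 hD12
  have h2' : ∀ p ∈ D1 ++ D2, ∀ q ∈ U3, p ≠ q := fun p hp q hq => (h2 q hq p hp).symm
  have h3 := hm hU4 hD123
  have h3' : ∀ p ∈ (D1 ++ D2) ++ D3, ∀ q ∈ U4, p ≠ q := fun p hp q hq => (h3 q hq p hp).symm
  simp only []
  rw [cfold_swap U2 D1 h1]
  dsimp only
  have e1 : (cfoldN ((cfoldN ((cfoldN (g, 0) U1).1, (cfoldN (g, 0) U1).2) U2).1, 0) D1).2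
      = (cfoldN ((cfoldN (g, 0) U1).1, 0) D1).2 := by
    simpa using congrArg Prod.snd (cfold_swap D1 U2 h1' (cfoldN (g, 0) U1).1 0 (cfoldN (g, 0) U1).2)
  rw [← e1]
  simp only [Prod.mk.eta]
  simp only [← cfoldN_append]
  rw [cfold_swap U3 (D1 ++ D2) h2]
  dsimp only
  have e2 : (cfoldN ((cfoldN ((cfoldN (g, 0) (U1 ++ U2)).1, (cfoldN (g, 0) (U1 ++ U2)).2) U3).1, 0) (D1 ++ D2)).2
      = (cfoldN ((cfoldN (g, 0) (U1 ++ U2)).1, 0) (D1 ++ D2)).2 := by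
    simpa using congrArg Prod.snd
      (cfold_swap (D1 ++ D2) U3 h2' (cfoldN (g, 0) (U1 ++ U2)).1 0 (cfoldN (g, 0) (U1 ++ U2)).2)
  rw [← e2]
  simp only [Prod.mk.eta]
  simp only [← cfoldN_append]
  rw [cfold_swap U4 ((D1 ++ D2) ++ D3) h3]
  dsimp only
  have e3 : (cfoldN ((cfoldN ((cfoldN (g, 0) ((U1 ++ U2) ++ U3)).1, (cfoldN (g, 0) ((U1 ++ U2) ++ U3)).2) U4).1, 0) ((D1 ++ D2) ++ D3)).2
      = (cfoldN ((cfoldN (g, 0) ((U1 ++ U2) ++ U3)).1, 0) ((D1 ++ D2) ++ D3)).2 := by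
    simpa using congrArg Prod.snd
      (cfold_swap ((D1 ++ D2) ++ D3) U4 h3' (cfoldN (g, 0) ((U1 ++ U2) ++ U3)).1 0 (cfoldN (g, 0) ((U1 ++ U2) ++ U3)).2)
  rw [← e3]
  simp only [Prod.mk.eta]
  simp only [← cfoldN_append]

-- ===== B-side machinery: gather-then-scatter = carried rotation on a duplicate-free path =====

-- apply a list of (cell, value) writes
def applyW (g : List (List Int)) (ws : List ((Nat × Nat) × Int)) : List (List Int) :=
  ws.foldl (fun g w => sN g w.1 w.2) g

-- the write list B gathers for one path, Nat level
def natPairs (g : List (List Int)) (P : List (Nat × Nat)) (v : Int) : List ((Nat × Nat) × Int) :=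
  match P with
  | [] => []
  | h :: t => (h, v) :: ((h :: t).zip t).map (fun sd => (sd.2, gN g sd.1))

theorem natPairs_cons (g : List (List Int)) (p : Nat × Nat) (ps : List (Nat × Nat)) (v : Int) :
    natPairs g (p :: ps) v = (p, v) :: natPairs g ps (gN g p) := by
  cases ps <;> rfl

theorem natPairs_fst_mem (g : List (List Int)) (P : List (Nat × Nat)) (v : Int) :
    ∀ w ∈ natPairs g P v, w.1 ∈ P := by
  cases P with
  | nil => intro w hw; cases hw
  | cons h t =>
    intro w hw
    rcases List.mem_cons.1 hw with rfl | hw'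
    · exact List.mem_cons_self ..
    · rcases List.mem_map.1 hw' with ⟨sd, hsd, rfl⟩
      exact List.mem_cons_of_mem _ (List.of_mem_zip hsd).2

theorem natPairs_congr (g g' : List (List Int)) (P : List (Nat × Nat)) (v : Int)
    (h : ∀ q ∈ P, gN g' q = gN g q) : natPairs g' P v = natPairs g P v := by
  cases P with
  | nil => rfl
  | cons p t =>
    simp only [natPairs, List.cons.injEq, true_and]
    refine List.map_congr_left ?_
    intro sd hsd
    rw [h sd.1 (List.of_mem_zip hsd).1]

theorem applyW_cons (g : List (List Int)) (w : (Nat × Nat) × Int) (ws : List ((Nat × Nat) × Int)) :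
    applyW g (w :: ws) = applyW (sN g w.1 w.2) ws := rfl

-- the key bridge: on a duplicate-free path, scattering the gathered predecessor values
-- equals A's carried in-place rotation
theorem scatter_eq_carry (P : List (Nat × Nat)) (hnd : P.Nodup) :
    ∀ (g : List (List Int)) (v : Int), applyW g (natPairs g P v) = (cfoldN (g, v) P).1 := by
  induction P with
  | nil => intro g v; rfl
  | cons p ps ih =>
    intro g v
    have hps : p ∉ ps := (List.nodup_cons.1 hnd).1
    rw [natPairs_cons, applyW_cons]
    have hcongr : natPairs g ps (gN g p) = natPairs (sN g p v) ps (gN g p) :=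
      (natPairs_congr g (sN g p v) ps (gN g p)
        (fun q hq => gN_sN_ne _ _ (fun e => hps (e ▸ hq)))).symm
    rw [hcongr, ih (List.nodup_cons.1 hnd).2]
    rfl

-- the Int-level item list B's dict accumulates for one path
def ringItems (g : List (List Int)) : List (Int × Int) → List ((Int × Int) × Int)
  | [] => []
  | h :: t => (h, 0) :: ((h :: t).zip t).map (fun sd => (sd.2, gC g sd.1.1 sd.1.2))

theorem ringItems_fst_mem (g : List (List Int)) (cells : List (Int × Int)) :
    ∀ pv ∈ ringItems g cells, pv.1 ∈ cells := by
  cases cells with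
  | nil => intro pv hpv; cases hpv
  | cons h t =>
    intro pv hpv
    rcases List.mem_cons.1 hpv with rfl | hpv'
    · exact List.mem_cons_self ..
    · rcases List.mem_map.1 hpv' with ⟨sd, hsd, rfl⟩
      exact List.mem_cons_of_mem _ (List.of_mem_zip hsd).2

theorem ringPairs_items (g : List (List Int)) (d : PySem.Dict (Int × Int) Int)
    (cells : List (Int × Int)) (hnd : cells.Nodup)
    (hfresh : ∀ p ∈ cells, d.contains p = false) :
    (ringPairs g d cells).items = d.items ++ ringItems g cells := by
  cases cells with
  | nil => simp [ringPairs, ringItems]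
  | cons h t =>
    have hh : d.contains h = false := hfresh h (List.mem_cons_self ..)
    have hkeys : (((h :: t).zip t).map (fun sd : (Int × Int) × (Int × Int) => sd.2)) = t :=
      List.map_snd_zip (l₁ := h :: t) (l₂ := t) (by simp)
    have hfresh1 : ∀ sd ∈ (h :: t).zip t, (d.insert h 0).contains sd.2 = false := by
      intro sd hsd
      have h2 : sd.2 ∈ t := (List.of_mem_zip hsd).2
      have hne : sd.2 ≠ h := fun e => (List.nodup_cons.1 hnd).1 (e ▸ h2)
      rw [PySem.Dict.contains_insert]
      simp [hne, hfresh sd.2 (List.mem_cons_of_mem _ h2)]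
    have hknd : (((h :: t).zip t).map (fun sd : (Int × Int) × (Int × Int) => sd.2)).Nodup := by
      rw [hkeys]; exact (List.nodup_cons.1 hnd).2
    have hred : ringPairs g d (h :: t)
        = ((h :: t).zip t).foldl (fun d sd => d.insert sd.2 (gC g sd.1.1 sd.1.2))
            (d.insert h 0) := rfl
    rw [hred, PySem.Dict.items_foldl_insert_fresh _ _ _ _ hfresh1 hknd,
      PySem.Dict.items_insert_of_not_contains _ _ hh]
    simp [ringItems]

-- Int item list → Nat write list on nonnegative coordinates
def convW (pv : (Int × Int) × Int) : (Nat × Nat) × Int := (toNatP pv.1, pv.2)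

theorem ringItems_toNat (g : List (List Int)) (cells : List (Int × Int))
    (h : ∀ p ∈ cells, 0 ≤ p.1 ∧ 0 ≤ p.2) :
    (ringItems g cells).map convW = natPairs g (cells.map toNatP) 0 := by
  cases cells with
  | nil => rfl
  | cons hd t =>
    simp only [ringItems, List.map_cons, natPairs, List.map_map]
    congr 1
    rw [show (toNatP hd :: t.map toNatP) = (hd :: t).map toNatP from rfl, List.zip_map,
      List.map_map]
    refine List.map_congr_left ?_
    intro sd hsd
    have h1 := h sd.1 (List.of_mem_zip hsd).1
    simp only [Function.comp, convW, toNatP, Prod.map]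
    rw [gC_toNat g h1.1 h1.2]

theorem foldl_sC_eq_applyW (items : List ((Int × Int) × Int))
    (h : ∀ pv ∈ items, 0 ≤ pv.1.1 ∧ 0 ≤ pv.1.2) :
    ∀ g, items.foldl (fun g pv => sC g pv.1.1 pv.1.2 pv.2) g = applyW g (items.map convW) := by
  induction items with
  | nil => intro g; rfl
  | cons pv ps ih =>
    intro g
    have hp := h pv (List.mem_cons_self ..)
    simp only [List.foldl_cons, List.map_cons, applyW_cons]
    rw [sC_toNat _ _ hp.1 hp.2, ih (fun x hx => h x (List.mem_cons_of_mem _ hx))]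
    rfl

-- ===== putting it together =====

theorem toNatP_inj_on {p q : Int × Int} (hp : 0 ≤ p.1 ∧ 0 ≤ p.2) (hq : 0 ≤ q.1 ∧ 0 ≤ q.2)
    (h : toNatP p = toNatP q) : p = q := by
  rcases p with ⟨a, b⟩; rcases q with ⟨c, d⟩
  simp only [toNatP, Prod.mk.injEq] at h
  have := h.1; have := h.2
  ext <;> simp <;> omega

-- membership descriptions of the two paths
theorem mem_upPath {air_r R C : Int} {p : Int × Int} (hp : p ∈ upPath air_r R C) :
    (p.1 = air_r ∧ 1 ≤ p.2 ∧ p.2 < C) ∨ (-1 < p.1 ∧ p.1 ≤ air_r - 1 ∧ p.2 = C - 1) ∨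
    (p.1 = 0 ∧ -1 < p.2 ∧ p.2 ≤ C - 2) ∨ (1 ≤ p.1 ∧ p.1 < air_r ∧ p.2 = 0) := by
  unfold upPath at hp
  simp only [List.mem_append, List.mem_map, PySem.List.mem_pyRange_one,
    PySem.List.mem_pyRange_neg_one] at hp
  rcases hp with ((⟨x, hx, rfl⟩ | ⟨x, hx, rfl⟩) | ⟨x, hx, rfl⟩) | ⟨x, hx, rfl⟩ <;>
    omega

theorem mem_downPath {air_r R C : Int} {p : Int × Int} (hp : p ∈ downPath air_r R C) :
    (p.1 = air_r + 1 ∧ 1 ≤ p.2 ∧ p.2 < C) ∨ (air_r + 2 ≤ p.1 ∧ p.1 < R ∧ p.2 = C - 1) ∨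
    (p.1 = R - 1 ∧ -1 < p.2 ∧ p.2 ≤ C - 2) ∨ (air_r + 1 < p.1 ∧ p.1 ≤ R - 2 ∧ p.2 = 0) := by
  unfold downPath at hp
  simp only [List.mem_append, List.mem_map, PySem.List.mem_pyRange_one,
    PySem.List.mem_pyRange_neg_one] at hp
  rcases hp with ((⟨x, hx, rfl⟩ | ⟨x, hx, rfl⟩) | ⟨x, hx, rfl⟩) | ⟨x, hx, rfl⟩ <;>
    omega

theorem nn_upPath {air_r R C : Int} (ha : 0 ≤ air_r) (hC : 1 ≤ C) :
    ∀ p ∈ upPath air_r R C, 0 ≤ p.1 ∧ 0 ≤ p.2 := by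
  intro p hp
  rcases mem_upPath hp with h | h | h | h <;> omega

theorem nn_downPath {air_r R C : Int} (ha : 0 ≤ air_r) (hC : 1 ≤ C) (hR1 : 2 ≤ C → 1 ≤ R) :
    ∀ p ∈ downPath air_r R C, 0 ≤ p.1 ∧ 0 ≤ p.2 := by
  intro p hp
  rcases mem_downPath hp with h | h | h | h
  · omega
  · omega
  · have := hR1 (by omega); omega
  · omega

theorem disj_paths {air_r R C : Int} (ha : 0 ≤ air_r) (hcr : 2 ≤ C → air_r + 2 ≤ R) :
    ∀ p ∈ upPath air_r R C, ∀ q ∈ downPath air_r R C, p ≠ q := by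
  intro p hp q hq
  have h1 : p.1 ≤ air_r := by rcases mem_upPath hp with h | h | h | h <;> omega
  have h2 : air_r < q.1 := by
    rcases mem_downPath hq with h | h | h | h
    · omega
    · omega
    · have := hcr (by omega); omega
    · omega
  intro e; rw [e] at h1; omega

-- nodup of the segments and paths
theorem nodup_seg_row (r : Int) (a b : Int) :
    ((PySem.List.pyRange a b 1).map (fun c => (r, c))).Nodup := by
  refine List.Nodup.map_on ?_ (PySem.List.nodup_pyRange_one _ _)
  intro x _ y _ e
  simpa using (Prod.mk.injEq .. ▸ e).2

theorem nodup_seg_row' (r : Int) (a b : Int) :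
    ((PySem.List.pyRange a b (-1)).map (fun c => (r, c))).Nodup := by
  refine List.Nodup.map_on ?_ ?_
  · intro x _ y _ e
    simpa using (Prod.mk.injEq .. ▸ e).2
  · rw [PySem.List.pyRange_neg_one_eq_reverse]
    exact List.nodup_reverse.2 (PySem.List.nodup_pyRange_one _ _)

theorem nodup_seg_col (c : Int) (a b : Int) :
    ((PySem.List.pyRange a b 1).map (fun r => (r, c))).Nodup := by
  refine List.Nodup.map_on ?_ (PySem.List.nodup_pyRange_one _ _)
  intro x _ y _ e
  simpa using (Prod.mk.injEq .. ▸ e).1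

theorem nodup_seg_col' (c : Int) (a b : Int) :
    ((PySem.List.pyRange a b (-1)).map (fun r => (r, c))).Nodup := by
  refine List.Nodup.map_on ?_ ?_
  · intro x _ y _ e
    simpa using (Prod.mk.injEq .. ▸ e).1
  · rw [PySem.List.pyRange_neg_one_eq_reverse]
    exact List.nodup_reverse.2 (PySem.List.nodup_pyRange_one _ _)

theorem nodup_upPath {air_r R C : Int} (ha : 0 ≤ air_r)
    (h1 : 1 ≤ air_r ∨ C ≤ 2) (h2 : 2 ≤ C ∨ air_r ≤ 1) :
    (upPath air_r R C).Nodup := by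
  unfold upPath
  simp only [List.nodup_append, List.mem_append, List.mem_map,
    PySem.List.mem_pyRange_one, PySem.List.mem_pyRange_neg_one]
  refine ⟨⟨⟨nodup_seg_row air_r 1 C, nodup_seg_col' (C - 1) (air_r - 1) (-1), ?_⟩,
      nodup_seg_row' 0 (C - 2) (-1), ?_⟩,
    nodup_seg_col 0 1 air_r, ?_⟩ <;> intro a ha' b hb' <;>
  [rcases ha' with ⟨x, hx, rfl⟩;
   rcases ha' with ⟨x, hx, rfl⟩ | ⟨x, hx, rfl⟩;
   rcases ha' with (⟨x, hx, rfl⟩ | ⟨x, hx, rfl⟩) | ⟨x, hx, rfl⟩] <;>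
  rcases hb' with ⟨y, hy, rfl⟩ <;>
  (intro e; simp only [Prod.mk.injEq] at e; omega)

theorem nodup_downPath {air_r R C : Int} (_ha : 0 ≤ air_r)
    (h1 : air_r + 3 ≤ R ∨ C ≤ 2) (h2 : 2 ≤ C ∨ R ≤ air_r + 3) :
    (downPath air_r R C).Nodup := by
  unfold downPath
  simp only [List.nodup_append, List.mem_append, List.mem_map,
    PySem.List.mem_pyRange_one, PySem.List.mem_pyRange_neg_one]
  refine ⟨⟨⟨nodup_seg_row (air_r + 1) 1 C, nodup_seg_col (C - 1) (air_r + 2) R, ?_⟩,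
      nodup_seg_row' (R - 1) (C - 2) (-1), ?_⟩,
    nodup_seg_col' 0 (R - 2) (air_r + 1), ?_⟩ <;> intro a ha' b hb' <;>
  [rcases ha' with ⟨x, hx, rfl⟩;
   rcases ha' with ⟨x, hx, rfl⟩ | ⟨x, hx, rfl⟩;
   rcases ha' with (⟨x, hx, rfl⟩ | ⟨x, hx, rfl⟩) | ⟨x, hx, rfl⟩] <;>
  rcases hb' with ⟨y, hy, rfl⟩ <;>
  (intro e; simp only [Prod.mk.injEq] at e; omega)

-- B's port normalized to two scatter passes over the Nat-level paths, reading the untouched grid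
theorem B_norm (air_r : Int) (graph : List (List Int)) (R C : Int)
    (hnnu : ∀ p ∈ upPath air_r R C, 0 ≤ p.1 ∧ 0 ≤ p.2)
    (hnnd : ∀ p ∈ downPath air_r R C, 0 ≤ p.1 ∧ 0 ≤ p.2)
    (hndu : (upPath air_r R C).Nodup) (hndd : (downPath air_r R C).Nodup)
    (hdisj : ∀ p ∈ upPath air_r R C, ∀ q ∈ downPath air_r R C, p ≠ q) :
    circulate_alt air_r graph R C
      = applyW graph (natPairs graph ((upPath air_r R C).map toNatP) 0
          ++ natPairs graph ((downPath air_r R C).map toNatP) 0) := by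
  have hup : (ringPairs graph PySem.Dict.empty (upPath air_r R C)).items
      = ringItems graph (upPath air_r R C) := by
    rw [ringPairs_items _ _ _ hndu (fun p _ => PySem.Dict.contains_empty _)]
    rfl
  have hfreshd : ∀ p ∈ downPath air_r R C,
      (ringPairs graph PySem.Dict.empty (upPath air_r R C)).contains p = false := by
    intro p hp
    rw [← Bool.not_eq_true, PySem.Dict.contains_iff_mem_keys]
    intro hmem
    have : p ∈ (ringPairs graph PySem.Dict.empty (upPath air_r R C)).items.map (·.1) := hmem
    rcases List.mem_map.1 this with ⟨pv, hpv, rfl⟩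
    rw [hup] at hpv
    exact hdisj pv.1 (ringItems_fst_mem _ _ _ hpv) pv.1 hp rfl
  have hitems : (ringPairs graph (ringPairs graph PySem.Dict.empty (upPath air_r R C))
      (downPath air_r R C)).items
      = ringItems graph (upPath air_r R C) ++ ringItems graph (downPath air_r R C) := by
    rw [ringPairs_items _ _ _ hndd hfreshd, hup]
  unfold circulate_alt
  simp only []
  rw [hitems]
  rw [foldl_sC_eq_applyW _ (by
    intro pv hpv
    rcases List.mem_append.1 hpv with h | h
    · exact hnnu pv.1 (ringItems_fst_mem _ _ _ h)
    · exact hnnd pv.1 (ringItems_fst_mem _ _ _ h))]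
  rw [List.map_append, ringItems_toNat _ _ hnnu, ringItems_toNat _ _ hnnd]

-- main equivalence on duplicate-free shapes
theorem circulate_eq (air_r : Int) (graph : List (List Int)) (R C : Int)
    (ha : 0 ≤ air_r) (hC : 1 ≤ C) (hR1 : 2 ≤ C → 1 ≤ R) (hcr : 2 ≤ C → air_r + 2 ≤ R)
    (h1 : 1 ≤ air_r ∨ C ≤ 2) (h2 : 2 ≤ C ∨ air_r ≤ 1)
    (h3 : air_r + 3 ≤ R ∨ C ≤ 2) (h4 : 2 ≤ C ∨ R ≤ air_r + 3) :
    circulate air_r graph R C = circulate_alt air_r graph R C := by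
  have hnnu := nn_upPath (R := R) (C := C) ha hC
  have hnnd := nn_downPath (R := R) (C := C) ha hC hR1
  have hndu := nodup_upPath (R := R) ha h1 h2
  have hndd := nodup_downPath ha h3 h4
  have hdisj := disj_paths ha hcr (R := R) (C := C)
  -- the Nat-cell segment lists (u-ring and d-ring, in A's traversal order)
  have eup : (upPath air_r R C).map toNatP
      = ((((PySem.List.pyRange 1 C 1).map (fun a => (air_r.toNat, a.toNat))
          ++ (PySem.List.pyRange (air_r - 1) (-1) (-1)).map (fun a => (a.toNat, (C - 1).toNat)))
          ++ (PySem.List.pyRange (C - 2) (-1) (-1)).map (fun a => ((0 : Int).toNat, a.toNat)))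
          ++ (PySem.List.pyRange 1 air_r 1).map (fun a => (a.toNat, (0 : Int).toNat))) := by
    unfold upPath
    simp only [List.map_append, List.map_map]
    rfl
  have edown : (downPath air_r R C).map toNatP
      = ((((PySem.List.pyRange 1 C 1).map (fun a => ((air_r + 1).toNat, a.toNat))
          ++ (PySem.List.pyRange (air_r + 2) R 1).map (fun a => (a.toNat, (C - 1).toNat)))
          ++ (PySem.List.pyRange (C - 2) (-1) (-1)).map (fun a => ((R - 1).toNat, a.toNat)))
          ++ (PySem.List.pyRange (R - 2) (air_r + 1) (-1)).map (fun a => (a.toNat, (0 : Int).toNat))) := by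
    unfold downPath
    simp only [List.map_append, List.map_map]
    rfl
  -- Nat-level cross-path distinctness, from the Int-level one
  have hcrossP : ∀ p ∈ (upPath air_r R C).map toNatP, ∀ q ∈ (downPath air_r R C).map toNatP,
      p ≠ q := by
    intro p hp q hq
    rcases List.mem_map.1 hp with ⟨p', hp', rfl⟩
    rcases List.mem_map.1 hq with ⟨q', hq', rfl⟩
    intro e
    exact hdisj p' hp' q' hq' (toNatP_inj_on (hnnu p' hp') (hnnd q' hq') e)
  have hcross := hcrossP
  rw [eup, edown] at hcross
  -- A's side: convert the six loops to Nat-cell folds and reorder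
  unfold circulate
  simp only []
  rw [ifoldC_toNat (PySem.List.pyRange 1 C 1) (fun _ => air_r) (fun a => a)
      (fun _ => air_r + 1) (fun a => a)
      (fun a hm => ⟨by show (0 : Int) ≤ air_r; omega,
        by show (0 : Int) ≤ a; have := PySem.List.mem_pyRange_one.1 hm; omega⟩)
      (fun a hm => ⟨by show (0 : Int) ≤ air_r + 1; omega,
        by show (0 : Int) ≤ a; have := PySem.List.mem_pyRange_one.1 hm; omega⟩)]
  rw [interleave_split (fun a => (air_r.toNat, a.toNat)) (fun a => ((air_r + 1).toNat, a.toNat))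
      (PySem.List.pyRange 1 C 1)
      (fun a _ b _ => by intro e; rw [Prod.mk.injEq] at e; omega)]
  rw [cfoldC_toNat (PySem.List.pyRange (air_r - 1) (-1) (-1)) (fun a => a) (fun _ => C - 1)
      (fun a hm => ⟨by show (0 : Int) ≤ a; have := PySem.List.mem_pyRange_neg_one.1 hm; omega,
        by show (0 : Int) ≤ C - 1; omega⟩)]
  rw [cfoldC_toNat (PySem.List.pyRange (air_r + 2) R 1) (fun a => a) (fun _ => C - 1)
      (fun a hm => ⟨by show (0 : Int) ≤ a; have := PySem.List.mem_pyRange_one.1 hm; omega,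
        by show (0 : Int) ≤ C - 1; omega⟩)]
  rw [ifoldC_toNat (PySem.List.pyRange (C - 2) (-1) (-1)) (fun _ => (0 : Int)) (fun a => a)
      (fun _ => R - 1) (fun a => a)
      (fun a hm => ⟨by show (0 : Int) ≤ 0; omega,
        by show (0 : Int) ≤ a; have := PySem.List.mem_pyRange_neg_one.1 hm; omega⟩)
      (fun a hm => ⟨by
          show (0 : Int) ≤ R - 1
          have := PySem.List.mem_pyRange_neg_one.1 hm
          have := hR1 (by omega); omega,
        by show (0 : Int) ≤ a; have := PySem.List.mem_pyRange_neg_one.1 hm; omega⟩)]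
  rw [interleave_split (fun a => ((0 : Int).toNat, a.toNat)) (fun a => ((R - 1).toNat, a.toNat))
      (PySem.List.pyRange (C - 2) (-1) (-1))
      (fun a ham b _ => by
        intro e; rw [Prod.mk.injEq] at e
        have := PySem.List.mem_pyRange_neg_one.1 ham
        have hR := hR1 (by omega)
        have hr2 := hcr (by omega)
        omega)]
  rw [cfoldC_toNat (PySem.List.pyRange 1 air_r 1) (fun a => a) (fun _ => (0 : Int))
      (fun a hm => ⟨by show (0 : Int) ≤ a; have := PySem.List.mem_pyRange_one.1 hm; omega,
        by show (0 : Int) ≤ 0; omega⟩)]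
  rw [cfoldC_toNat (PySem.List.pyRange (R - 2) (air_r + 1) (-1)) (fun a => a) (fun _ => (0 : Int))
      (fun a hm => ⟨by show (0 : Int) ≤ a; have := PySem.List.mem_pyRange_neg_one.1 hm; omega,
        by show (0 : Int) ≤ 0; omega⟩)]
  dsimp only
  have hasm := assemble
      ((PySem.List.pyRange 1 C 1).map (fun a => (air_r.toNat, a.toNat)))
      ((PySem.List.pyRange (air_r - 1) (-1) (-1)).map (fun a => (a.toNat, (C - 1).toNat)))
      ((PySem.List.pyRange (C - 2) (-1) (-1)).map (fun a => ((0 : Int).toNat, a.toNat)))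
      ((PySem.List.pyRange 1 air_r 1).map (fun a => (a.toNat, (0 : Int).toNat)))
      ((PySem.List.pyRange 1 C 1).map (fun a => ((air_r + 1).toNat, a.toNat)))
      ((PySem.List.pyRange (air_r + 2) R 1).map (fun a => (a.toNat, (C - 1).toNat)))
      ((PySem.List.pyRange (C - 2) (-1) (-1)).map (fun a => ((R - 1).toNat, a.toNat)))
      ((PySem.List.pyRange (R - 2) (air_r + 1) (-1)).map (fun a => (a.toNat, (0 : Int).toNat)))
      graph hcross
  simp only [] at hasm
  rw [hasm]
  -- B's side: gather-then-scatter equals the two carried rotations on duplicate-free paths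
  rw [B_norm air_r graph R C hnnu hnnd hndu hndd hdisj]
  have hndUP : ((upPath air_r R C).map toNatP).Nodup :=
    List.Nodup.map_on (fun x hx y hy e => toNatP_inj_on (hnnu x hx) (hnnu y hy) e) hndu
  have hndDP : ((downPath air_r R C).map toNatP).Nodup :=
    List.Nodup.map_on (fun x hx y hy e => toNatP_inj_on (hnnd x hx) (hnnd y hy) e) hndd
  rw [applyW, List.foldl_append, ← applyW, ← applyW]
  rw [scatter_eq_carry _ hndUP]
  have hkeysD : ∀ w ∈ natPairs graph ((downPath air_r R C).map toNatP) 0,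
      ∀ q ∈ (upPath air_r R C).map toNatP, w.1 ≠ q := by
    intro w hw q hq
    have hwm := natPairs_fst_mem _ _ _ _ hw
    intro e
    exact hcrossP q hq w.1 hwm (by rw [e])
  have hcongr : natPairs graph ((downPath air_r R C).map toNatP) 0
      = natPairs (cfoldN (graph, 0) ((upPath air_r R C).map toNatP)).1
          ((downPath air_r R C).map toNatP) 0 := by
    refine (natPairs_congr _ _ _ _ ?_).symm
    intro q hq
    exact gN_cfold q _ (fun p hp => fun e => hcrossP p hp q hq e) (graph, 0)
  rw [hcongr, scatter_eq_carry _ hndDP]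
  rw [eup, edown]

-- fully degenerate shapes: every loop and both paths are empty, both sides return graph
theorem circulate_eq_empty (air_r : Int) (graph : List (List Int)) (R C : Int)
    (hC : C ≤ 1) (ha : air_r ≤ 0) (hR : R ≤ air_r + 2) :
    circulate air_r graph R C = circulate_alt air_r graph R C := by
  unfold circulate circulate_alt ringPairs upPath downPath
  rw [PySem.List.pyRange_one_eq_nil hC, PySem.List.pyRange_one_eq_nil (show air_r ≤ 1 by omega),
    PySem.List.pyRange_one_eq_nil hR,
    PySem.List.pyRange_neg_one_eq_nil (show C - 2 ≤ -1 by omega),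
    PySem.List.pyRange_neg_one_eq_nil (show air_r - 1 ≤ -1 by omega),
    PySem.List.pyRange_neg_one_eq_nil (show R - 2 ≤ air_r + 1 by omega)]
  simp
  rfl

-- ===== VERDICT (by name: the statement is the Claim_ definition above) =====
theorem circulate_spec : Claim_equal_circulate := by
  intro air_r graph R C _ pre
  unfold Spec_circulate
  rcases pre with h | h | h
  · exact circulate_eq air_r graph R C (by omega) (by omega) (fun _ => by omega)
      (fun _ => by omega) (by omega) (by omega) (by omega) (by omega)
  · exact circulate_eq air_r graph R C (by omega) (by omega) (fun _ => by omega)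
      (fun _ => by omega) (by omega) (by omega) (by omega) (by omega)
  · exact circulate_eq_empty air_r graph R C (by omega) (by omega) (by omega)
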